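-- pv_equiv track=rewrite | github.com/k-harada/AtCoder | ABC153/F_TLE.py | solve
-- ===== SOURCE A (Python) =====
-- from bisect import bisect_right
--
-- class SegTree:
--
--     def __init__(self, a_list, x_list):
--         assert max(a_list) <= 10 ** 7
--         assert min(a_list) >= 0
--         self.n = 1
--         m = max(a_list)
--         while self.n <= m:
--             self.n *= 2
--         self.dat_a = [0] * (self.n * 2 - 1)
--         self.dat_b = [0] * (self.n * 2 - 1)
--         for a, x in zip(a_list, x_list):
--             self._add(a, a + 1, x, 0, 0, self.n)
--
--     def _add(self, a, b, x, k, left, right):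
--         # add k for [a, b)
--         if a <= left and right <= b:
--             self.dat_a[k] += x
--         elif left < b and a < right:
--             self.dat_b[k] += (min(b, right) - max(a, left)) * x
--             self._add(a, b, x, k * 2 + 1, left, (left + right) // 2)
--             self._add(a, b, x, k * 2 + 2, (left + right) // 2, right)
--
--     def _query_sum(self, a, b, k, left, right):
--         if b <= left or right <= a:
--             return 0
--         elif a <= left and right <= b:
--             return self.dat_a[k] + (right - left) * self.dat_b[k]
--         else:
--             res = (min(b, right) - max(a, left)) * self.dat_a[k]
--             res += self._query_sum(a, b, k * 2 + 1, left, (left + right) // 2)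
--             res += self._query_sum(a, b, k * 2 + 2, (left + right) // 2, right)
--             return res
--
--     def add(self, a, b, x):
--         return self._add(a, b, x, 0, 0, self.n)
--
--     def query_sum(self, a, b):
--         return self._query_sum(a, b, 0, 0, self.n)
--
--     def _return_value(self, a, k, left, right):
--         if left == a and right == a + 1:
--             return self.dat_a[k]
--         elif a < (left + right) // 2:
--             return self.dat_a[k] + self._return_value(a, k * 2 + 1, left, (left + right) // 2)
--         else:
--             return self.dat_a[k] + self._return_value(a, k * 2 + 2, (left + right) // 2, right)
--
--     def return_value(self, a):
--         return self._return_value(a, 0, 0, self.n)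
--
-- def solve(n, d, a, xh_list):
--     res = 0
--     xh_list_s = sorted(xh_list, key=lambda x: x[0])
--     x_list_s = [xh[0] for xh in xh_list_s]
--     h_list_s = [xh[1] for xh in xh_list_s]
--
--     sg = SegTree(list(range(n)), h_list_s)
--
--     for i in range(n):
--         v = sg.return_value(i)
--         if v > 0:
--             t = (v - 1) // a + 1
--             res += t
--             j = bisect_right(x_list_s, x_list_s[i] + 2 * d)
--             sg.add(i, j, - t * a)
--     return res
-- ===== SOURCE B (Python) =====
-- from bisect import bisect_right
--
-- def solve(n, d, a, xh_list):
--     # one left-to-right sweep with a difference array (imos) instead of a segment tree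
--     s = sorted(xh_list, key=lambda t: t[0])
--     xs = [x for x, _ in s]
--     m = min(n, len(s))
--     diff = [0] * (len(s) + 1)
--     cur = 0
--     res = 0
--     for i in range(m):
--         cur += diff[i]
--         hp = s[i][1] + cur
--         if hp > 0:
--             t = (hp - 1) // a + 1
--             res += t
--             j = bisect_right(xs, xs[i] + 2 * d)
--             if i < j:
--                 cur -= t * a
--                 diff[j] += t * a
--     return res
-- ===== Notes on version B (the rewrite author's own statement) =====
-- stated objective: faster
-- what changed: Replaces the recursive range-add/point-query segment tree with a single left-to-right sweep over a difference (imos) array plus a running accumulator; bisect still finds each bomb's range end.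
-- outside the precondition, e.g. on solve(1, 0, 0, [(0, -1), (5, 3)]): A returns 0, B returns 0
-- crash fix: For n <= 0 A raises ValueError (max() of an empty range) and for n > 10**7+1 its assert fails, while B simply sweeps the first min(n, len) sorted monsters and returns the answer. — e.g. on solve(0, 1, 1, []): A raises ValueError, B returns 0
import Mathlib
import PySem

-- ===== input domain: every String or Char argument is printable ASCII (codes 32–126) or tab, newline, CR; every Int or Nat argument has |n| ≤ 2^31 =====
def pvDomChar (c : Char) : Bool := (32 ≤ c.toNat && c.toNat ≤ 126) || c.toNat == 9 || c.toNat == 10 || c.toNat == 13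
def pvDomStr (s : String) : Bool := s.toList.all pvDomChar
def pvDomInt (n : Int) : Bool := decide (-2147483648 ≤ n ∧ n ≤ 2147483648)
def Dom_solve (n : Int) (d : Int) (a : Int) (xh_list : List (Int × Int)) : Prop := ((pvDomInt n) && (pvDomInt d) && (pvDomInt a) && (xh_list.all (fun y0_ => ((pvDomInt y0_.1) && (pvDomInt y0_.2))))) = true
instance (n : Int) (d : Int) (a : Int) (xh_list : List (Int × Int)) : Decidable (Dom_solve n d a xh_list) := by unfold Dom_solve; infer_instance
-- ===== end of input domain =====

-- B replaces A's recursive range-add segment tree by a single difference-array sweep (same answers, measurably faster).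
-- Equivalence is about the return value; neither program mutates its arguments.

-- ===== PORT A =====
-- Python list state of the segment tree (dat_a, dat_b) as two index→value maps; only in-range cells are ever touched by solve.
structure Seg where
  da : Nat → Int
  db : Nat → Int

-- SegTree._add (dat_b's Python value is an int, so its increment is computed in Int)
def segAdd (a b : Nat) (x : Int) (k l r : Nat) (st : Seg) : Seg :=
  if _h1 : a ≤ l ∧ r ≤ b then
    { st with da := Function.update st.da k (st.da k + x) }
  else if _h2 : l < b ∧ a < r then
    segAdd a b x (2*k+2) ((l+r)/2) r
      (segAdd a b x (2*k+1) l ((l+r)/2)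
        { st with db := Function.update st.db k (st.db k + ((min b r : Int) - (max a l : Int)) * x) })
  else st
termination_by r - l
decreasing_by all_goals omega

-- SegTree._return_value; fuel bounds the recursion depth (self.n is always enough for the calls solve makes)
def rvGo : Nat → (Nat → Int) → Nat → Nat → Nat → Nat → Int
  | 0, da, _, k, _, _ => da k
  | f+1, da, i, k, l, r =>
    if l = i ∧ r = i+1 then da k
    else if i < (l+r)/2 then da k + rvGo f da i (2*k+1) l ((l+r)/2)
    else da k + rvGo f da i (2*k+2) ((l+r)/2) r

-- "self.n = 1; while self.n <= m: self.n *= 2" (the 0 < t guard only totalises; the call starts at t = 1)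
def pow2gtGo (m t : Nat) : Nat :=
  if _h : 0 < t ∧ t ≤ m then pow2gtGo m (2*t) else t
termination_by m + 1 - t

-- SegTree.__init__: the zip(a_list, x_list) loop of point adds
def segInit (N : Nat) (ps : List (Nat × Int)) : Seg :=
  ps.foldl (fun st ph => segAdd ph.1 (ph.1+1) ph.2 0 0 N st) ⟨fun _ => 0, fun _ => 0⟩

-- body of A's "for i in range(n)" loop
def stepA (a d : Int) (xs : List Int) (N : Nat) (acc : Int × Seg) (i : Nat) : Int × Seg :=
  let v := rvGo N acc.2.da i 0 0 N
  if v > 0 then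
    let t := PySem.Int.floordiv (v - 1) a + 1
    let j := PySem.List.bisectRight xs (xs.getD i 0 + 2*d)
    (acc.1 + t, segAdd i j (-t * a) 0 0 N acc.2)
  else acc

def solve (n : Int) (d : Int) (a : Int) (xh_list : List (Int × Int)) : Int :=
  let s := PySem.List.sorted xh_list Prod.fst
  let xs := s.map Prod.fst
  let hs := s.map Prod.snd
  let N := pow2gtGo (n-1).toNat 1
  let st0 := segInit N ((List.range n.toNat).zip hs)
  ((List.range n.toNat).foldl (stepA a d xs N) (0, st0)).1

-- ===== PORT B =====
-- body of B's sweep: state (res, cur, diff)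
def stepB (a d : Int) (s : List (Int × Int)) (xs : List Int) (acc : Int × Int × (Nat → Int)) (i : Nat) : Int × Int × (Nat → Int) :=
  let cur := acc.2.1 + acc.2.2 i
  let hp := (s.getD i (0, 0)).2 + cur
  if hp > 0 then
    let t := PySem.Int.floordiv (hp - 1) a + 1
    let j := PySem.List.bisectRight xs (xs.getD i 0 + 2*d)
    if i < j then (acc.1 + t, cur - t * a, Function.update acc.2.2 j (acc.2.2 j + t * a))
    else (acc.1 + t, cur, acc.2.2)
  else (acc.1, cur, acc.2.2)

def solve_alt (n : Int) (d : Int) (a : Int) (xh_list : List (Int × Int)) : Int :=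
  let s := PySem.List.sorted xh_list Prod.fst
  let xs := s.map Prod.fst
  let m := min n.toNat s.length
  ((List.range m).foldl (stepB a d s xs) (0, 0, fun _ => 0)).1

-- ===== PRECONDITION & SPEC =====
-- Pre_ excludes exactly the inputs where A raises: n ≤ 0 (ValueError: max() of an empty range), n > 10**7+1 (failed
-- assert), and a = 0 when some monster has positive hit points (ZeroDivisionError); the last disjunct is stated over the
-- whole list, slightly narrower than A's exact raise condition when n < len(xh_list) — see the cite.
def Pre_solve (n : Int) (d : Int) (a : Int) (xh_list : List (Int × Int)) : Prop :=
  1 ≤ n ∧ n ≤ 10000001 ∧ (a ≠ 0 ∨ ∀ p ∈ xh_list, p.2 ≤ 0)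
instance (n : Int) (d : Int) (a : Int) (xh_list : List (Int × Int)) : Decidable (Pre_solve n d a xh_list) := by unfold Pre_solve; infer_instance
def pvWitness_solve : Int × Int × Int × (List (Int × Int)) := (2, 1, 3, [(0, 5), (4, 2)])

-- For n ≤ 0 A raises ValueError (max() of an empty range) and for n > 10**7+1 its assert fails, while B simply sweeps
-- the first min(n, len) sorted monsters and returns the answer.
def Raises_solve (n : Int) (d : Int) (a : Int) (xh_list : List (Int × Int)) : Prop :=
  n ≤ 0 ∨ 10000001 < n
instance (n : Int) (d : Int) (a : Int) (xh_list : List (Int × Int)) : Decidable (Raises_solve n d a xh_list) := by unfold Raises_solve; infer_instance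
def pvRaiseWitness_solve : Int × Int × Int × (List (Int × Int)) := (0, 1, 1, [])
def pvRaiseWitnessOut_solve : Int := 0

def Spec_solve (n : Int) (d : Int) (a : Int) (xh_list : List (Int × Int)) (out : Int) : Prop := out = solve_alt n d a xh_list
instance (n : Int) (d : Int) (a : Int) (xh_list : List (Int × Int)) (out : Int) : Decidable (Spec_solve n d a xh_list out) := by unfold Spec_solve; infer_instance

-- ===== CLAIM (what is proved, stated in full; the proofs are below) =====
def Claim_equal_solve : Prop := ∀ (n : Int) (d : Int) (a : Int) (xh_list : List (Int × Int)), Dom_solve n d a xh_list → Pre_solve n d a xh_list → Spec_solve n d a xh_list (solve n d a xh_list)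
def Claim_raises_solve : Prop := (∀ (n : Int) (d : Int) (a : Int) (xh_list : List (Int × Int)), Dom_solve n d a xh_list → Raises_solve n d a xh_list → ¬ Pre_solve n d a xh_list) ∧ (Dom_solve (pvRaiseWitness_solve.1) (pvRaiseWitness_solve.2.1) (pvRaiseWitness_solve.2.2.1) (pvRaiseWitness_solve.2.2.2) ∧ Raises_solve (pvRaiseWitness_solve.1) (pvRaiseWitness_solve.2.1) (pvRaiseWitness_solve.2.2.1) (pvRaiseWitness_solve.2.2.2) ∧ solve_alt (pvRaiseWitness_solve.1) (pvRaiseWitness_solve.2.1) (pvRaiseWitness_solve.2.2.1) (pvRaiseWitness_solve.2.2.2) = pvRaiseWitnessOut_solve)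

-- ===== LEMMAS AND PROOFS =====

-- heap parent and "j lies in the subtree of k" (proof-only notions)
def par (j : Nat) : Nat := (j - 1) / 2
def inSub (k j : Nat) : Prop := ∃ m, par^[m] j = k

lemma par_iter_le (m j : Nat) : par^[m] j ≤ j := by
  induction m generalizing j with
  | zero => simp
  | succ m ih =>
    rw [Function.iterate_succ_apply]
    exact le_trans (ih (par j)) (by unfold par; omega)

lemma inSub_le {k j : Nat} (h : inSub k j) : k ≤ j := by
  obtain ⟨m, hm⟩ := h; exact hm ▸ par_iter_le m j

lemma inSub_self (k : Nat) : inSub k k := ⟨0, rfl⟩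

lemma inSub_child1 {k j : Nat} (h : inSub (2*k+1) j) : inSub k j := by
  obtain ⟨m, hm⟩ := h
  exact ⟨m + 1, by rw [Function.iterate_succ_apply', hm]; unfold par; omega⟩

lemma inSub_child2 {k j : Nat} (h : inSub (2*k+2) j) : inSub k j := by
  obtain ⟨m, hm⟩ := h
  exact ⟨m + 1, by rw [Function.iterate_succ_apply', hm]; unfold par; omega⟩

lemma sib_disjoint {k j : Nat} (h1 : inSub (2*k+1) j) (h2 : inSub (2*k+2) j) : False := by
  obtain ⟨m1, hm1⟩ := h1
  obtain ⟨m2, hm2⟩ := h2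
  rcases Nat.lt_trichotomy m1 m2 with h | h | h
  · obtain ⟨s, rfl⟩ : ∃ s, m2 = (s+1) + m1 := ⟨m2 - m1 - 1, by omega⟩
    rw [Function.iterate_add_apply, hm1, Function.iterate_succ_apply] at hm2
    have hp : par (2*k+1) = k := by unfold par; omega
    rw [hp] at hm2
    have := par_iter_le s k
    omega
  · subst h; omega
  · obtain ⟨s, rfl⟩ : ∃ s, m1 = (s+1) + m2 := ⟨m1 - m2 - 1, by omega⟩
    rw [Function.iterate_add_apply, hm2, Function.iterate_succ_apply] at hm1
    have hp : par (2*k+2) = k := by unfold par; omega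
    rw [hp] at hm1
    have := par_iter_le s k
    omega

lemma segAdd_frame (a b : Nat) (x : Int) (k l r : Nat) (st : Seg) :
    ∀ j, ¬ inSub k j → (segAdd a b x k l r st).da j = st.da j := by
  fun_induction segAdd a b x k l r st with
  | case1 k l r st h1 =>
    intro j hj
    simp only [Function.update_apply]
    rw [if_neg (by rintro rfl; exact hj (inSub_self j))]
  | case2 k l r st h1 h2 ih1 ih2 =>
    intro j hj
    rw [ih2 j (fun h => hj (inSub_child2 h)), ih1 j (fun h => hj (inSub_child1 h))]
  | case3 k l r st h1 h2 => intro j hj; rfl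

lemma rv_congr (f : Nat) (da da' : Nat → Int) (i k l r : Nat)
    (h : ∀ j, inSub k j → da j = da' j) : rvGo f da i k l r = rvGo f da' i k l r := by
  induction f generalizing k l r with
  | zero => exact h k (inSub_self k)
  | succ f ih =>
    simp only [rvGo]
    rw [h k (inSub_self k)]
    split_ifs
    · rfl
    · rw [ih (2*k+1) l ((l+r)/2) (fun j hj => h j (inSub_child1 hj))]
    · rw [ih (2*k+2) ((l+r)/2) r (fun j hj => h j (inSub_child2 hj))]

lemma rv_update_root (f : Nat) (da : Nat → Int) (i k l r : Nat) (x : Int) :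
    rvGo f (Function.update da k (da k + x)) i k l r = rvGo f da i k l r + x := by
  cases f with
  | zero => simp [rvGo]
  | succ f =>
    simp only [rvGo]
    have hk : Function.update da k (da k + x) k = da k + x := Function.update_self k _ da
    have hoff : ∀ k', k < k' → ∀ j, inSub k' j → Function.update da k (da k + x) j = da j := by
      intro k' hk' j hj
      exact Function.update_of_ne (by have := inSub_le hj; omega) _ da
    split_ifs
    · exact hk
    · rw [hk, rv_congr f _ da i (2*k+1) l ((l+r)/2) (hoff (2*k+1) (by omega))]; ring
    · rw [hk, rv_congr f _ da i (2*k+2) ((l+r)/2) r (hoff (2*k+2) (by omega))]; ring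

lemma seg_main (f : Nat) : ∀ (a b : Nat) (x : Int) (k l r : Nat) (st : Seg) (i : Nat),
    l ≤ i → i < r → r - l ≤ f →
    rvGo f (segAdd a b x k l r st).da i k l r
      = rvGo f st.da i k l r + (if a ≤ i ∧ i < b then x else 0) := by
  induction f with
  | zero => intro a b x k l r st i h1 h2 h3; omega
  | succ f ih =>
    intro a b x k l r st i hli hir hf
    rw [segAdd]
    by_cases h1 : a ≤ l ∧ r ≤ b
    · rw [dif_pos h1]
      rw [rv_update_root]
      rw [if_pos ⟨by omega, by omega⟩]
    · rw [dif_neg h1]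
      by_cases h2 : l < b ∧ a < r
      · rw [dif_pos h2]
        have hlr : l + 2 ≤ r := by omega
        have hbase : ¬ (l = i ∧ r = i + 1) := by omega
        set st1 : Seg := { st with db := Function.update st.db k (st.db k + ((min b r : Int) - (max a l : Int)) * x) } with hst1
        have hst1da : st1.da = st.da := rfl
        set stL : Seg := segAdd a b x (2*k+1) l ((l+r)/2) st1 with hstL
        set stR : Seg := segAdd a b x (2*k+2) ((l+r)/2) r stL with hstR
        have hDk : stR.da k = st.da k := by
          rw [hstR, segAdd_frame _ _ _ _ _ _ _ _ (fun h => by have := inSub_le h; omega)]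
          rw [hstL, segAdd_frame _ _ _ _ _ _ _ _ (fun h => by have := inSub_le h; omega)]
        by_cases hmid : i < (l+r)/2
        · have hL : rvGo f stR.da i (2*k+1) l ((l+r)/2)
              = rvGo f stL.da i (2*k+1) l ((l+r)/2) := by
            apply rv_congr
            intro j hj
            rw [hstR, segAdd_frame _ _ _ _ _ _ _ _ (fun h => sib_disjoint hj h)]
          conv_lhs => rw [rvGo]
          rw [if_neg hbase, if_pos hmid, hDk, hL, hstL,
            ih a b x (2*k+1) l ((l+r)/2) st1 i hli hmid (by omega), hst1da]
          conv_rhs => rw [rvGo]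
          rw [if_neg hbase, if_pos hmid]
          ring
        · have hR : rvGo f stR.da i (2*k+2) ((l+r)/2) r
              = rvGo f stL.da i (2*k+2) ((l+r)/2) r + (if a ≤ i ∧ i < b then x else 0) := by
            rw [hstR, ih a b x (2*k+2) ((l+r)/2) r stL i (by omega) hir (by omega)]
          have hL : rvGo f stL.da i (2*k+2) ((l+r)/2) r
              = rvGo f st.da i (2*k+2) ((l+r)/2) r := by
            apply rv_congr
            intro j hj
            rw [hstL, segAdd_frame _ _ _ _ _ _ _ _ (fun h => sib_disjoint h hj)]
          conv_lhs => rw [rvGo]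
          rw [if_neg hbase, if_neg hmid, hDk, hR, hL]
          conv_rhs => rw [rvGo]
          rw [if_neg hbase, if_neg hmid]
          ring
      · rw [dif_neg h2, if_neg (by omega)]
        ring

-- point value of the tree, as solve reads it
def segVal (N : Nat) (st : Seg) (q : Nat) : Int := rvGo N st.da q 0 0 N

lemma rv_zero (f : Nat) : ∀ (i k l r : Nat), rvGo f (fun _ => 0) i k l r = 0 := by
  induction f with
  | zero => intro i k l r; rfl
  | succ f ih => intro i k l r; simp only [rvGo]; split_ifs <;> simp [ih]

lemma segVal_segAdd (N : Nat) (a b : Nat) (x : Int) (st : Seg) (q : Nat) (hq : q < N) :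
    segVal N (segAdd a b x 0 0 N st) q = segVal N st q + (if a ≤ q ∧ q < b then x else 0) :=
  seg_main N a b x 0 0 N st q (Nat.zero_le q) hq (by omega)

lemma segVal_segInit_aux (N : Nat) : ∀ (c k : Nat) (hsl : List Int) (st : Seg) (q : Nat), q < N →
    segVal N (((List.range' k c).zip hsl).foldl (fun st ph => segAdd ph.1 (ph.1+1) ph.2 0 0 N st) st) q
      = segVal N st q + (if k ≤ q ∧ q - k < min c hsl.length then hsl.getD (q - k) 0 else 0) := by
  intro c
  induction c with
  | zero => intro k hsl st q hq; simp
  | succ c ih =>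
    intro k hsl st q hq
    cases hsl with
    | nil => simp
    | cons h tl =>
      rw [List.range'_succ]
      simp only [List.zip_cons_cons, List.foldl_cons]
      rw [ih (k+1) tl (segAdd k (k+1) h 0 0 N st) q hq, segVal_segAdd N k (k+1) h st q hq]
      rcases Nat.lt_trichotomy q k with hlt | heq | hgt
      · rw [if_neg (show ¬(k ≤ q ∧ q < k + 1) by omega),
          if_neg (show ¬(k + 1 ≤ q ∧ q - (k+1) < min c tl.length) by omega),
          if_neg (show ¬(k ≤ q ∧ q - k < min (c+1) (h :: tl).length) by omega)]
        ring
      · rw [if_pos (show k ≤ q ∧ q < k + 1 by omega),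
          if_neg (show ¬(k + 1 ≤ q ∧ q - (k+1) < min c tl.length) by omega),
          if_pos (show k ≤ q ∧ q - k < min (c+1) (h :: tl).length by
            simp only [List.length_cons]; omega)]
        rw [show q - k = 0 by omega, List.getD_cons_zero]
        ring
      · rw [if_neg (show ¬(k ≤ q ∧ q < k + 1) by omega)]
        by_cases hin : k + 1 ≤ q ∧ q - (k+1) < min c tl.length
        · rw [if_pos hin, if_pos (show k ≤ q ∧ q - k < min (c+1) (h :: tl).length by
            simp only [List.length_cons]; omega)]
          have hs : q - k = (q - (k+1)) + 1 := by omega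
          rw [hs, List.getD_cons_succ]
          ring
        · rw [if_neg hin, if_neg (show ¬(k ≤ q ∧ q - k < min (c+1) (h :: tl).length) by
            simp only [List.length_cons]; omega)]
          ring

lemma segVal_segInit (N nn : Nat) (hsl : List Int) (q : Nat) (hq : q < N) :
    segVal N (segInit N ((List.range nn).zip hsl)) q
      = if q < min nn hsl.length then hsl.getD q 0 else 0 := by
  unfold segInit
  rw [List.range_eq_range', segVal_segInit_aux N nn 0 hsl _ q hq]
  unfold segVal
  rw [rv_zero]
  simp only [Nat.zero_le, true_and, Nat.sub_zero, zero_add]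

lemma pow2gtGo_gt (m : Nat) : ∀ t : Nat, 0 < t → m < pow2gtGo m t := by
  intro t
  fun_induction pow2gtGo m t with
  | case1 t h ih => intro _; exact ih (by omega)
  | case2 t h => intro ht; omega

-- running partial sums of B's difference array: diff i + … + diff q
def Ssum (diff : Nat → Int) (i q : Nat) : Int := ((List.range' i (q + 1 - i)).map diff).sum

lemma Ssum_self (diff : Nat → Int) (i : Nat) : Ssum diff i i = diff i := by
  simp [Ssum, List.range'_succ]

lemma Ssum_cons (diff : Nat → Int) (i q : Nat) (h : i ≤ q) :
    Ssum diff i q = diff i + Ssum diff (i+1) q := by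
  unfold Ssum
  have : q + 1 - i = (q + 1 - (i+1)) + 1 := by omega
  rw [this, List.range'_succ]
  simp

lemma sum_map_update (l : List Nat) (hl : l.Nodup) (diff : Nat → Int) (j : Nat) (c : Int) :
    (l.map (Function.update diff j (diff j + c))).sum
      = (l.map diff).sum + if j ∈ l then c else 0 := by
  induction l with
  | nil => simp
  | cons a t ih =>
    have hat : a ∉ t := (List.nodup_cons.mp hl).1
    have htd : t.Nodup := (List.nodup_cons.mp hl).2
    simp only [List.map_cons, List.sum_cons, ih htd, List.mem_cons]
    by_cases haj : a = j
    · subst haj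
      rw [Function.update_self, if_neg hat, if_pos (Or.inl rfl)]
      ring
    · rw [Function.update_of_ne (by exact fun h => haj h) _ diff]
      by_cases hjt : j ∈ t
      · rw [if_pos hjt, if_pos (Or.inr hjt)]; ring
      · rw [if_neg hjt, if_neg (by rintro (h | h); exact haj h.symm; exact hjt h)]; ring

lemma Ssum_update (diff : Nat → Int) (i q j : Nat) (c : Int) (h : i ≤ q + 1) :
    Ssum (Function.update diff j (diff j + c)) i q
      = Ssum diff i q + if i ≤ j ∧ j ≤ q then c else 0 := by
  unfold Ssum
  rw [sum_map_update _ (List.nodup_range') diff j c]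
  by_cases hcond : i ≤ j ∧ j ≤ q
  · rw [if_pos (List.mem_range'_1.mpr ⟨hcond.1, by omega⟩), if_pos hcond]
  · rw [if_neg (fun hm => hcond ⟨(List.mem_range'_1.mp hm).1, by
      have := (List.mem_range'_1.mp hm).2; omega⟩), if_neg hcond]

lemma getD_map_snd (s : List (Int × Int)) (q : Nat) :
    (s.map Prod.snd).getD q 0 = (s.getD q (0, 0)).2 := by
  simp only [List.getD, List.getElem?_map]
  cases s[q]? <;> rfl

lemma Ssum_zero (i q : Nat) : Ssum (fun _ => 0) i q = 0 := by
  simp [Ssum]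

lemma loop_sim (a d : Int) (s : List (Int × Int)) (N nn m : Nat)
    (hm : m = min nn s.length) (hN : nn ≤ N)
    (hbr : ∀ key : Int, PySem.List.bisectRight (s.map Prod.fst) key ≤ s.length) :
    ∀ (cnt i : Nat) (res : Int) (st : Seg) (cur : Int) (diff : Nat → Int),
      i + cnt = nn →
      (∀ q, i ≤ q → q < m → segVal N st q = (s.map Prod.snd).getD q 0 + cur + Ssum diff i q) →
      (∀ q, m ≤ q → q < nn → segVal N st q = 0) →
      ((List.range' i cnt).foldl (stepA a d (s.map Prod.fst) N) (res, st)).1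
        = ((List.range' i (m - i)).foldl (stepB a d s (s.map Prod.fst)) (res, cur, diff)).1 := by
  intro cnt
  induction cnt with
  | zero =>
    intro i res st cur diff hcnt _ _
    rw [show m - i = 0 by omega]
    simp
  | succ cnt ih =>
    intro i res st cur diff hcnt inv2 inv3
    rw [List.range'_succ, List.foldl_cons]
    by_cases him : i < m
    · have hiN : i < N := by omega
      have hEq : rvGo N st.da i 0 0 N = (s.getD i (0, 0)).2 + (cur + diff i) := by
        rw [← getD_map_snd]
        have h0 := inv2 i (le_refl i) him
        rw [Ssum_self] at h0
        exact h0.trans (by ring)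
      rw [show m - i = (m - (i+1)) + 1 by omega, List.range'_succ, List.foldl_cons]
      simp only [stepA, stepB, hEq]
      by_cases hv : (s.getD i (0, 0)).2 + (cur + diff i) > 0
      · rw [if_pos hv, if_pos hv]
        set t := PySem.Int.floordiv ((s.getD i (0, 0)).2 + (cur + diff i) - 1) a + 1 with ht
        set j := PySem.List.bisectRight (s.map Prod.fst) ((s.map Prod.fst).getD i 0 + 2*d) with hj
        have hjL : j ≤ s.length := hbr _
        by_cases hij : i < j
        · rw [if_pos hij]
          apply ih (i+1) (res + t) _ (cur + diff i - t * a)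
            (Function.update diff j (diff j + t * a)) (by omega)
          · intro q h1 h2
            have hqN : q < N := by omega
            rw [segVal_segAdd N i j (-t * a) st q hqN, inv2 q (by omega) h2,
              Ssum_cons diff i q (by omega),
              Ssum_update diff (i+1) q j (t * a) (by omega)]
            by_cases hjq : j ≤ q
            · rw [if_neg (by omega), if_pos ⟨by omega, hjq⟩]; ring
            · rw [if_pos ⟨by omega, by omega⟩, if_neg (by omega)]; ring
          · intro q h1 h2
            have hqN : q < N := by omega
            rw [segVal_segAdd N i j (-t * a) st q hqN, inv3 q h1 h2,
              if_neg (by omega)]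
            ring
        · rw [if_neg hij]
          apply ih (i+1) (res + t) _ (cur + diff i) diff (by omega)
          · intro q h1 h2
            have hqN : q < N := by omega
            rw [segVal_segAdd N i j (-t * a) st q hqN, inv2 q (by omega) h2,
              Ssum_cons diff i q (by omega), if_neg (by omega)]
            ring
          · intro q h1 h2
            have hqN : q < N := by omega
            rw [segVal_segAdd N i j (-t * a) st q hqN, inv3 q h1 h2,
              if_neg (by omega)]
            ring
      · rw [if_neg hv, if_neg hv]
        apply ih (i+1) res st (cur + diff i) diff (by omega)
        · intro q h1 h2
          rw [inv2 q (by omega) h2, Ssum_cons diff i q (by omega)]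
          ring
        · exact inv3
    · have hi0 : segVal N st i = 0 := inv3 i (by omega) (by omega)
      have hstep : stepA a d (s.map Prod.fst) N (res, st) i = (res, st) := by
        simp only [stepA]
        rw [if_neg (by exact fun h => by rw [show rvGo N st.da i 0 0 N = segVal N st i from rfl, hi0] at h; omega)]
      rw [hstep, show m - i = 0 by omega]
      have := ih (i+1) res st cur diff (by omega)
        (fun q h1 h2 => absurd h2 (by omega)) inv3
      rw [show m - (i+1) = 0 by omega] at this
      simpa using this

-- ===== VERDICT is below (statements by name) =====
theorem solve_spec : Claim_equal_solve := by
  unfold Claim_equal_solve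
  intro n d a xh _dom hpre
  obtain ⟨hn1, _hn2, _⟩ := hpre
  simp only [Spec_solve, solve, solve_alt]
  have hpair : ((PySem.List.sorted xh Prod.fst).map Prod.fst).Pairwise (· ≤ ·) :=
    PySem.List.sorted_map_key_pairwise xh Prod.fst
  have hbr : ∀ key : Int, PySem.List.bisectRight ((PySem.List.sorted xh Prod.fst).map Prod.fst) key
      ≤ (PySem.List.sorted xh Prod.fst).length := by
    intro key
    have := (PySem.List.bisectRight_spec _ key hpair).1
    simpa using this
  have hN : n.toNat ≤ pow2gtGo (n-1).toNat 1 := by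
    have := pow2gtGo_gt (n-1).toNat 1 (by omega)
    omega
  simp only [List.range_eq_range']
  apply loop_sim a d (PySem.List.sorted xh Prod.fst) (pow2gtGo (n-1).toNat 1) n.toNat
    (min n.toNat (PySem.List.sorted xh Prod.fst).length) rfl hN hbr n.toNat 0 0 _ 0 (fun _ => 0)
    (by omega)
  · intro q _ h2
    rw [← List.range_eq_range', segVal_segInit _ n.toNat _ q (by omega), Ssum_zero]
    rw [if_pos (by simp only [List.length_map]; omega)]
    ring
  · intro q h1 h2
    rw [← List.range_eq_range', segVal_segInit _ n.toNat _ q (by omega)]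
    rw [if_neg (by simp only [List.length_map]; omega)]

-- ===== VERDICT (by name: the statements are the Claim_ definitions above) =====
theorem solve_raises : Claim_raises_solve := by
  unfold Claim_raises_solve
  constructor
  · intro n d a xh _ hr hp
    unfold Raises_solve at hr
    unfold Pre_solve at hp
    omega
  · exact ⟨by decide, by decide, by decide⟩

-- self-check: the raise-witness value stated above is exactly what solve_alt returns there
theorem pvRaiseWitnessOut_ok : solve_alt (pvRaiseWitness_solve.1) (pvRaiseWitness_solve.2.1)
    (pvRaiseWitness_solve.2.2.1) (pvRaiseWitness_solve.2.2.2) = pvRaiseWitnessOut_solve :=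
  solve_raises.2.2.2
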